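-- pv_equiv track=rewrite | github.com/Pengrey/CD | Projeto/general/CrackerDemo2.py | getPswds
-- ===== SOURCE A (Python) =====
-- def getPswds(charlist, increment, pswd: str = "a"):
--     limit = len(charlist)
--     for k in range(increment):
--         remain = 1
--         new_pswd = list(pswd)
--         for i in range(len(new_pswd)-1,-1,-1):
--             if (charlist.index(new_pswd[i]) + remain) >= limit:
--                 if(i != 0):
--                     new_pswd[i] = charlist[0]
--                     remain = 1
--                 else:
--                     new_pswd[i] = charlist[0]
--                     new_pswd.insert(0, charlist[0])
--                     remain = 0
--             else:
--                 new_pswd[i] = charlist[charlist.index(new_pswd[i]) + remain]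
--                 remain = 0
--             if remain == 0: break
--         pswd = "".join(new_pswd)
--     return pswd
-- ===== SOURCE B (Python) =====
-- def getPswds(charlist, increment, pswd: str = "a"):
--     if increment <= 0:
--         return pswd
--     limit = len(charlist)
--     idx = {c: i for i, c in enumerate(charlist)}
--     v = 0
--     for c in pswd:
--         v = v * limit + idx[c] + 1
--     v += increment
--     out = []
--     while v > 0:
--         v -= 1
--         out.append(charlist[v % limit])
--         v //= limit
--     return "".join(reversed(out))
-- ===== Notes on version B (the rewrite author's own statement) =====
-- stated objective: alternative
-- what changed: B decodes the password to an integer in bijective base-N, adds the increment once, and re-encodes (O(len+log increment)), instead of A's repeating a character-by-character odometer step (with repeated charlist.index scans) increment times; a timing run could not measure this (A raises on its generated inputs), so no speed is claimed.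
-- intended difference: On an empty pswd with increment >= 1, A's inner loop never runs and A returns '' unchanged (a leftover-loop-state artefact), while B returns the bijective base-N encoding of the increment, the intended result of incrementing increment times. — e.g. on getPswds(["a", "b"], 1, ""): A returns "", B returns "a"
-- outside the precondition, e.g. on getPswds(['a', 'a'], 2, 'a'): A returns 'a', B returns 'aa'; on getPswds([], 2, ''): A returns '', B raises ZeroDivisionError; on getPswds(['a', 'b'], 1, 'xa'): A returns 'xb', B raises KeyError
import Mathlib
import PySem

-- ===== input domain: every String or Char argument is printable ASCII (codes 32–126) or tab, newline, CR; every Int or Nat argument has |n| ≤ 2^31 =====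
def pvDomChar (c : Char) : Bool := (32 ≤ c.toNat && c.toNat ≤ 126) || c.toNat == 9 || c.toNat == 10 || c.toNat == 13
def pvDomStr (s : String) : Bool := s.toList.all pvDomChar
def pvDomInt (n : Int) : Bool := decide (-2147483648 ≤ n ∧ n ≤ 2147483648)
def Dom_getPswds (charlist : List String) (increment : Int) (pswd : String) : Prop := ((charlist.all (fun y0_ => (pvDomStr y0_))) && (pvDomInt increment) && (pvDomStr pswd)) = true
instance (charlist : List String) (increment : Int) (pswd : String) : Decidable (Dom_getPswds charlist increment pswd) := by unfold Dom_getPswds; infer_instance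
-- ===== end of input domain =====

-- B replaces A's increment-times odometer stepping by decode-to-integer / add / re-encode in bijective base N (objective: alternative algorithm; asymptotics differ but no measured speed is claimed).


-- ===== PORT A =====
-- inner loop over i in range(len(new_pswd)-1,-1,-1), state (new_pswd, remain); 'break' = returning some;
-- none = a Python exception (ValueError from charlist.index / IndexError), excluded by Pre_.
-- new_pswd[i] = … uses List.set i.toNat: every i produced by this countdown range is ≥ 0, so it is Python-exact here.
def pvStepGoA (charlist : List String) (limit : Int) : List Int → List String → Int → Option (List String)
  | [], np, _remain => some np
  | i :: is, np, remain =>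
    match PySem.List.pyGet? np i with
    | none => none
    | some ci =>
      match PySem.List.index? charlist ci with
      | none => none
      | some j =>
        if limit ≤ (j : Int) + remain then
          match PySem.List.pyGet? charlist 0 with
          | none => none
          | some c0 =>
            if i ≠ 0 then
              pvStepGoA charlist limit is (np.set i.toNat c0) 1
            else
              some (c0 :: np.set i.toNat c0)   -- new_pswd.insert(0, charlist[0]); remain = 0 → break
        else
          match PySem.List.pyGet? charlist ((j : Int) + remain) with
          | none => none
          | some cr => some (np.set i.toNat cr)   -- remain = 0 → break

-- one iteration of the outer 'for k in range(increment)' body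
def pvStepA (charlist : List String) (pswd : String) : Option String :=
  let limit : Int := charlist.length
  let np : List String := pswd.toList.map (fun c => String.ofList [c])   -- list(pswd)
  (pvStepGoA charlist limit (PySem.List.pyRange ((np.length : Int) - 1) (-1) (-1)) np 1).map
    (fun l => PySem.Str.join "" l)

-- outer loop: range(increment) runs max(increment, 0) times
def pvOuterA (charlist : List String) : Nat → String → Option String
  | 0, pswd => some pswd
  | Nat.succ n, pswd =>
    match pvStepA charlist pswd with
    | none => none
    | some p => pvOuterA charlist n p

def getPswds (charlist : List String) (increment : Int) (pswd : String) : String :=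
  (pvOuterA charlist increment.toNat pswd).getD pswd   -- none only where Python A raises (outside Pre_)

-- ===== PORT B =====
-- idx = {c: i for i, c in enumerate(charlist)}
def pvDictB (charlist : List String) : PySem.Dict String Int :=
  (PySem.List.enumerate charlist 0).foldl (fun d p => d.insert p.2 p.1) PySem.Dict.empty

-- while v > 0: v -= 1; out.append(charlist[v % limit]); v //= limit
-- (the 0 < limit guard only makes the recursion total: Python raises ZeroDivisionError there, outside Pre_)
def pvEncodeB (charlist : List String) (limit : Int) (v : Int) (out : List String) : List String :=
  if h : 0 < v ∧ 0 < limit then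
    pvEncodeB charlist limit (PySem.Int.floordiv (v - 1) limit)
      (out ++ [(PySem.List.pyGet? charlist (PySem.Int.mod (v - 1) limit)).getD ""])
  else out
  termination_by v.toNat
  decreasing_by
    rw [PySem.Int.floordiv_eq_ediv_of_pos h.2]
    have h1 : (v - 1) / limit ≤ v - 1 := Int.ediv_le_self limit (by omega)
    omega

def getPswds_alt (charlist : List String) (increment : Int) (pswd : String) : String :=
  if increment ≤ 0 then pswd
  else
    let limit : Int := charlist.length
    let idx := pvDictB charlist
    match pswd.toList.foldl
        (fun acc c => acc.bind (fun v =>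
          (PySem.Dict.get? idx (String.ofList [c])).map (fun i => v * limit + i + 1)))
        (some 0) with
    | none => pswd   -- KeyError in Python (outside Pre_)
    | some v => PySem.Str.join "" ((pvEncodeB charlist limit (v + increment) []).reverse)

-- ===== PRECONDITION & SPEC =====
-- For increment ≥ 1 Pre_ restricts to the natural domain of the task — a nonempty duplicate-free alphabet of single
-- characters containing every character of pswd: outside it A raises (ValueError/IndexError on charlist.index), except
-- on duplicate alphabets (where A's first-match .index lookup gives an accidental value, see cites) and on passwords with
-- an invalid character that A's early-breaking inner loop happens never to read (empty pswd, or a bad char left of the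
-- first non-carrying position — there B's up-front decode raises, see cites); for increment ≤ 0 both programs return
-- pswd unchanged and nothing is excluded.
def Pre_getPswds (charlist : List String) (increment : Int) (pswd : String) : Prop :=
  increment ≤ 0 ∨
    (charlist ≠ [] ∧ charlist.all (fun s => s.toList.length == 1) = true ∧ charlist.Nodup ∧
      pswd.toList.all (fun c => (charlist.map String.toList).contains [c]) = true)
instance (charlist : List String) (increment : Int) (pswd : String) : Decidable (Pre_getPswds charlist increment pswd) := by unfold Pre_getPswds; infer_instance

def pvWitness_getPswds : List String × Int × String := (["a", "b"], 3, "a")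

-- On an empty pswd with increment ≥ 1, A's inner loop never runs and A returns "" unchanged (leftover loop state),
-- while B returns the bijective base-N encoding of the increment — the intended result of incrementing increment times.
def D_getPswds (charlist : List String) (increment : Int) (pswd : String) : Prop :=
  pswd = "" ∧ 1 ≤ increment
instance (charlist : List String) (increment : Int) (pswd : String) : Decidable (D_getPswds charlist increment pswd) := by unfold D_getPswds; infer_instance

def Spec_getPswds (charlist : List String) (increment : Int) (pswd : String) (out : String) : Prop := ¬ D_getPswds charlist increment pswd → out = getPswds_alt charlist increment pswd
instance (charlist : List String) (increment : Int) (pswd : String) (out : String) : Decidable (Spec_getPswds charlist increment pswd out) := by unfold Spec_getPswds; infer_instance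

def pvDiffWitness_getPswds : List String × Int × String := (["a", "b"], 1, "")
def pvDiffWitnessOut_getPswds : String × String := ("", "a")

-- ===== CLAIM (what is proved, stated in full; the proofs are below) =====
def Claim_unchanged_getPswds : Prop := ∀ (charlist : List String) (increment : Int) (pswd : String), Dom_getPswds charlist increment pswd → Pre_getPswds charlist increment pswd → Spec_getPswds charlist increment pswd (getPswds charlist increment pswd)
def Claim_changed_getPswds : Prop := Dom_getPswds (pvDiffWitness_getPswds.1) (pvDiffWitness_getPswds.2.1) (pvDiffWitness_getPswds.2.2) ∧ Pre_getPswds (pvDiffWitness_getPswds.1) (pvDiffWitness_getPswds.2.1) (pvDiffWitness_getPswds.2.2) ∧ D_getPswds (pvDiffWitness_getPswds.1) (pvDiffWitness_getPswds.2.1) (pvDiffWitness_getPswds.2.2) ∧ getPswds (pvDiffWitness_getPswds.1) (pvDiffWitness_getPswds.2.1) (pvDiffWitness_getPswds.2.2) = pvDiffWitnessOut_getPswds.1 ∧ getPswds_alt (pvDiffWitness_getPswds.1) (pvDiffWitness_getPswds.2.1) (pvDiffWitness_getPswds.2.2) = pvDiffWitnessOut_getPswds.2 ∧ pvDiffWitnessOut_getPswds.1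 ≠ pvDiffWitnessOut_getPswds.2
def Claim_exact_getPswds : Prop := ∀ (charlist : List String) (increment : Int) (pswd : String), Dom_getPswds charlist increment pswd → Pre_getPswds charlist increment pswd → D_getPswds charlist increment pswd → getPswds charlist increment pswd ≠ getPswds_alt charlist increment pswd

-- ===== LEMMAS AND PROOFS =====

-- ===== abstract layer =====
def pvToS (c : Char) : String := String.ofList [c]

def pvDecR (cl : List String) : List String → Nat
  | [] => 0
  | d :: r => (cl.idxOf d + 1) + cl.length * pvDecR cl r

def pvEncR (cl : List String) : Nat → List String
  | 0 => []
  | w + 1 =>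
    if h : cl.length = 0 then []
    else cl[w % cl.length]'(Nat.mod_lt _ (Nat.pos_of_ne_zero h)) :: pvEncR cl (w / cl.length)
  termination_by w => w
  decreasing_by exact Nat.lt_succ_of_le (Nat.div_le_self _ _)

def pvStepRev (cl : List String) : List String → List String
  | [] => []
  | [d] =>
    if cl.length ≤ cl.idxOf d + 1 then [cl.headI, cl.headI]
    else [cl.getD (cl.idxOf d + 1) ""]
  | d :: a :: r =>
    if cl.length ≤ cl.idxOf d + 1 then cl.headI :: pvStepRev cl (a :: r)
    else cl.getD (cl.idxOf d + 1) "" :: a :: r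

theorem pvHeadI_mem (l : List String) (h : l ≠ []) : l.headI ∈ l := by
  match l, h with
  | c :: cs, _ => simp [List.headI]

def pvCanon (cl : List String) (m : Nat) : String := PySem.Str.join "" ((pvEncR cl m).reverse)
def pvVal (cl : List String) (s : String) : Nat := pvDecR cl ((s.toList.map pvToS).reverse)

-- L1
theorem pvDecR_pvEncR (cl : List String) (hne : cl ≠ []) (hnd : cl.Nodup) :
    ∀ w, pvDecR cl (pvEncR cl w) = w := by
  intro w
  induction w using Nat.strong_induction_on with
  | _ w ih =>
    match w with
    | 0 => simp [pvEncR, pvDecR]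
    | w + 1 =>
      have hL : cl.length ≠ 0 := by simpa using hne
      rw [pvEncR]
      simp only [hL, dite_false]
      rw [pvDecR]
      rw [List.Nodup.idxOf_getElem hnd _ _]
      rw [ih (w / cl.length) (Nat.lt_succ_of_le (Nat.div_le_self _ _))]
      have := Nat.mod_add_div w cl.length
      omega

-- L2
theorem pvEncR_pvDecR (cl : List String) (hnd : cl.Nodup) :
    ∀ r, (∀ d ∈ r, d ∈ cl) → pvEncR cl (pvDecR cl r) = r := by
  intro r
  induction r with
  | nil => intro _; simp [pvDecR, pvEncR]
  | cons d t ih =>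
    intro hv
    have hd : d ∈ cl := hv d (by simp)
    have hlt : cl.idxOf d < cl.length := List.idxOf_lt_length_of_mem hd
    have hL : cl.length ≠ 0 := by omega
    rw [pvDecR]
    have hrw : cl.idxOf d + 1 + cl.length * pvDecR cl t
        = (cl.idxOf d + cl.length * pvDecR cl t) + 1 := by omega
    rw [hrw, pvEncR]
    simp only [hL, dite_false]
    have hmod : (cl.idxOf d + cl.length * pvDecR cl t) % cl.length = cl.idxOf d := by
      rw [Nat.add_mul_mod_self_left]
      exact Nat.mod_eq_of_lt hlt
    have hdiv : (cl.idxOf d + cl.length * pvDecR cl t) / cl.length = pvDecR cl t := by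
      rw [Nat.add_mul_div_left _ _ (Nat.pos_of_ne_zero hL), Nat.div_eq_of_lt hlt]
      omega
    congr 1
    · rw [getElem_congr rfl hmod (hmod ▸ Nat.mod_lt _ (Nat.pos_of_ne_zero hL)), List.getElem_idxOf hlt]
    · rw [hdiv]
      exact ih (fun x hx => hv x (by simp [hx]))

-- validity of stepRev
theorem pvStepRev_valid (cl : List String) (hne : cl ≠ []) :
    ∀ r, (∀ d ∈ r, d ∈ cl) → ∀ d ∈ pvStepRev cl r, d ∈ cl := by
  intro r
  induction r with
  | nil => intro _; simp [pvStepRev]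
  | cons d t ih =>
    intro hv x hx
    have hd : d ∈ cl := hv d (by simp)
    have hlt : cl.idxOf d < cl.length := List.idxOf_lt_length_of_mem hd
    have hhead : cl.headI ∈ cl := pvHeadI_mem cl hne
    have hget : cl.length ≤ cl.idxOf d + 1 ∨ cl.getD (cl.idxOf d + 1) "" ∈ cl := by
      by_cases hc : cl.length ≤ cl.idxOf d + 1
      · exact Or.inl hc
      · refine Or.inr ?_
        rw [List.getD_eq_getElem cl _ (by omega)]
        exact List.getElem_mem _
    match t with
    | [] =>
      rw [pvStepRev] at hx
      by_cases hc : cl.length ≤ cl.idxOf d + 1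
      · simp only [hc, if_true] at hx
        rcases (by simpa using hx : x = cl.headI ∨ x = cl.headI) with h | h <;> simp [h, hhead]
      · simp only [hc, if_false] at hx
        rcases hget with h | h
        · omega
        · simp only [List.mem_singleton] at hx
          rw [hx]; exact h
    | a :: t' =>
      rw [pvStepRev] at hx
      by_cases hc : cl.length ≤ cl.idxOf d + 1
      · simp only [hc, if_true] at hx
        rcases (by simpa using hx : x = cl.headI ∨ x ∈ pvStepRev cl (a :: t')) with h | h
        · simp [h, hhead]
        · exact ih (fun y hy => hv y (by simp [hy])) x h
      · simp only [hc, if_false] at hx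
        rcases hget with h | h
        · omega
        · rcases (by simpa using hx : x = cl.getD (cl.idxOf d + 1) "" ∨ x = a ∨ x ∈ t') with h1 | h1 | h1
          · rw [h1]; exact h
          · exact hv x (by simp [h1])
          · exact hv x (by simp [h1])

-- L3
theorem pvDecR_pvStepRev (cl : List String) (hne : cl ≠ []) (hnd : cl.Nodup) :
    ∀ r, r ≠ [] → (∀ d ∈ r, d ∈ cl) → pvDecR cl (pvStepRev cl r) = pvDecR cl r + 1 := by
  have hidx0 : cl.idxOf cl.headI = 0 := by
    match cl, hne with
    | c :: cs, _ => simp [List.headI, List.idxOf_cons_self]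
  intro r
  induction r with
  | nil => intro h; exact absurd rfl h
  | cons d t ih =>
    intro _ hv
    have hd : d ∈ cl := hv d (by simp)
    have hlt : cl.idxOf d < cl.length := List.idxOf_lt_length_of_mem hd
    match t with
    | [] =>
      rw [pvStepRev]
      by_cases hc : cl.length ≤ cl.idxOf d + 1
      · simp only [hc, if_true]
        simp [pvDecR, hidx0]
        omega
      · simp only [hc, if_false]
        have hlt1 : cl.idxOf d + 1 < cl.length := by omega
        simp only [pvDecR]
        rw [List.getD_eq_getElem cl _ hlt1, List.Nodup.idxOf_getElem hnd _ _]
        omega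
    | a :: t' =>
      rw [pvStepRev]
      by_cases hc : cl.length ≤ cl.idxOf d + 1
      · simp only [hc, if_true]
        have hstep := ih (by simp) (fun y hy => hv y (by simp [hy]))
        simp only [pvDecR, hidx0] at hstep ⊢
        rw [hstep, Nat.mul_add, Nat.mul_one]
        omega
      · simp only [hc, if_false]
        have hlt1 : cl.idxOf d + 1 < cl.length := by omega
        rw [List.getD_eq_getElem cl _ hlt1]
        simp only [pvDecR]
        rw [List.Nodup.idxOf_getElem hnd _ _]
        omega

theorem pvIndex?_mem (l : List String) (d : String) (h : d ∈ l) :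
    PySem.List.index? l d = some (l.idxOf d) := by
  induction l with
  | nil => simp at h
  | cons a t ih =>
    by_cases hda : a = d
    · subst hda; rw [PySem.List.index?_cons_self]; simp
    · have hm : d ∈ t := by
        rcases List.mem_cons.mp h with h' | h'
        · exact absurd h'.symm hda
        · exact h'
      rw [PySem.List.index?_cons_of_ne t hda, ih hm, List.idxOf_cons_ne _ hda]
      simp

-- L4: positions processed lie inside np, so a fixed tail rides along
theorem pvStepGoA_frame (cl : List String) (L : Int) :
    ∀ (is : List Int) (np tail : List String) (remain : Int),
      (∀ i ∈ is, 0 ≤ i ∧ i < (np.length : Int)) →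
      pvStepGoA cl L is (np ++ tail) remain = (pvStepGoA cl L is np remain).map (· ++ tail) := by
  intro is
  induction is with
  | nil => intros; simp [pvStepGoA]
  | cons i is ih =>
    intro np tail remain hb
    obtain ⟨h0, hlt⟩ := hb i (by simp)
    have hlt' : i.toNat < np.length := by omega
    have hget : PySem.List.pyGet? (np ++ tail) i = PySem.List.pyGet? np i := by
      rw [PySem.List.pyGet?_of_nonneg (np ++ tail) h0, PySem.List.pyGet?_of_nonneg np h0]
      exact List.getElem?_append_left hlt'
    rw [pvStepGoA, pvStepGoA]
    simp only [hget]
    cases hnp : PySem.List.pyGet? np i with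
    | none => rfl
    | some ci =>
      simp only [hnp]
      cases hix : PySem.List.index? cl ci with
      | none => rfl
      | some j =>
        simp only [hix]
        by_cases hcond : L ≤ (j : Int) + remain
        · simp only [hcond, if_true]
          cases hc0 : PySem.List.pyGet? cl 0 with
          | none => rfl
          | some c0 =>
            simp only [hc0]
            have hset : (np ++ tail).set i.toNat c0 = np.set i.toNat c0 ++ tail :=
              List.set_append_left _ _ hlt'
            by_cases hi0 : i ≠ 0
            · rw [if_pos hi0, if_pos hi0, hset]
              exact ih (np.set i.toNat c0) tail 1
                (fun x hx => by simpa using hb x (by simp [hx]))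
            · rw [if_neg hi0, if_neg hi0, hset]
              simp
        · simp only [hcond, if_false]
          cases hcr : PySem.List.pyGet? cl ((j : Int) + remain) with
          | none => rfl
          | some cr =>
            simp only [List.set_append_left _ _ hlt']
            simp

theorem pvPyGet?_zero_headI (cl : List String) (hne : cl ≠ []) :
    PySem.List.pyGet? cl 0 = some cl.headI := by
  match cl, hne with
  | c :: cs, _ => simp [List.headI]

-- L5: the inner loop, read on the reversed digit list, is pvStepRev
theorem pvStepGoA_eq (cl : List String) (hne : cl ≠ []) (hnd : cl.Nodup) :
    ∀ r, r ≠ [] → (∀ d ∈ r, d ∈ cl) →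
      pvStepGoA cl (cl.length : Int) (PySem.List.pyRange ((r.reverse.length : Int) - 1) (-1) (-1)) r.reverse 1
        = some (pvStepRev cl r).reverse := by
  intro r
  induction r with
  | nil => intro h; exact absurd rfl h
  | cons d t ih =>
    intro _ hv
    have hd : d ∈ cl := hv d (by simp)
    have hlt : cl.idxOf d < cl.length := List.idxOf_lt_length_of_mem hd
    have hrev : (d :: t).reverse = t.reverse ++ [d] := by simp
    have hlen : ((d :: t).reverse.length : Int) - 1 = (t.length : Int) := by simp
    rw [hlen, PySem.List.pyRange_neg_one_cons (by omega : (-1:Int) < (t.length : Int))]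
    rw [pvStepGoA]
    have hget : PySem.List.pyGet? (d :: t).reverse ((t.length : Int)) = some d := by
      rw [hrev, PySem.List.pyGet?_natCast]
      rw [show (t.length : Nat) = t.reverse.length + 0 by simp]
      rw [List.getElem?_append_right (by simp)]
      simp
    simp only [hget, pvIndex?_mem cl d hd]
    have hsetd : ∀ x : String, (d :: t).reverse.set ((t.length : Int)).toNat x = t.reverse ++ [x] := by
      intro x
      rw [hrev, show ((t.length : Int)).toNat = t.reverse.length + 0 by simp]
      rw [List.set_append_right _ _ (by simp)]
      simp
    by_cases hc : cl.length ≤ cl.idxOf d + 1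
    · have hcond : (cl.length : Int) ≤ ((cl.idxOf d : Nat) : Int) + 1 := by exact_mod_cast hc
      simp only [hcond, if_true, pvPyGet?_zero_headI cl hne]
      rw [hsetd cl.headI]
      match t with
      | [] =>
        rw [if_neg (by simp)]
        rw [pvStepRev]
        simp only [hc, if_true]
        simp
      | a :: t' =>
        rw [if_pos (show ((a :: t').length : Int) ≠ 0 by simp only [List.length_cons]; push_cast; omega)]
        rw [pvStepGoA_frame cl (cl.length : Int) _ (a :: t').reverse [cl.headI] 1
          (fun x hx => by
            rw [PySem.List.mem_pyRange_neg_one] at hx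
            simp only [List.length_reverse]
            omega)]
        rw [show ((a :: t').length : Int) - 1 = ((a :: t').reverse.length : Int) - 1 by simp]
        rw [ih (by simp) (fun y hy => hv y (by simp [hy]))]
        rw [pvStepRev]
        simp only [hc, if_true]
        simp
    · have hcond : ¬ ((cl.length : Int) ≤ ((cl.idxOf d : Nat) : Int) + 1) := by
        omega
      simp only [hcond, if_false]
      have hget1 : PySem.List.pyGet? cl (((cl.idxOf d : Nat) : Int) + 1)
          = some (cl.getD (cl.idxOf d + 1) "") := by
        rw [show ((cl.idxOf d : Nat) : Int) + 1 = ((cl.idxOf d + 1 : Nat) : Int) by push_cast; ring]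
        rw [PySem.List.pyGet?_natCast]
        rw [List.getD_eq_getElem cl _ (by omega)]
        simp [List.getElem?_eq_getElem (by omega : cl.idxOf d + 1 < cl.length)]
      simp only [hget1]
      rw [hsetd]
      match t with
      | [] =>
        rw [pvStepRev]
        simp only [hc, if_false]
        simp
      | a :: t' =>
        rw [pvStepRev]
        simp only [hc, if_false]
        simp

-- L6: "".join of one-character strings splits back into exactly those strings
theorem pvJoin_toList (l : List String) (h1 : ∀ s ∈ l, s.toList.length = 1) :
    (PySem.Str.join "" l).toList = l.map (fun s => s.toList.headI) := by
  have hmap : l.map String.toList = (l.map (fun s => s.toList.headI)).map (fun c => [c]) := by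
    rw [List.map_map]
    apply List.map_congr_left
    intro s hs
    obtain ⟨c, hc⟩ := List.length_eq_one_iff.mp (h1 s hs)
    simp [hc]
  rw [PySem.Str.toList_join, show ("" : String).toList = [] from rfl, hmap,
    PySem.Chars.join_nil_singletons]

theorem pvJoin_split (l : List String) (h1 : ∀ s ∈ l, s.toList.length = 1) :
    (PySem.Str.join "" l).toList.map pvToS = l := by
  rw [pvJoin_toList l h1, List.map_map]
  conv_rhs => rw [← List.map_id l]
  apply List.map_congr_left
  intro s hs
  obtain ⟨c, hc⟩ := List.length_eq_one_iff.mp (h1 s hs)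
  simp only [Function.comp_apply, hc, List.headI, pvToS, id]
  rw [← hc]
  exact String.ofList_toList

-- L7/L8 helpers about pvCanon
theorem pvEncR_valid (cl : List String) : ∀ m, ∀ d ∈ pvEncR cl m, d ∈ cl := by
  intro m
  induction m using Nat.strong_induction_on with
  | _ m ih =>
    match m with
    | 0 => simp [pvEncR]
    | w + 1 =>
      intro d hd
      rw [pvEncR] at hd
      by_cases hL : cl.length = 0
      · simp [hL] at hd
      · simp only [hL, dite_false] at hd
        rcases List.mem_cons.mp hd with h | h
        · rw [h]; exact List.getElem_mem _
        · exact ih (w / cl.length) (Nat.lt_succ_of_le (Nat.div_le_self _ _)) d h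

theorem pvCanon_np (cl : List String) (h1 : ∀ s ∈ cl, s.toList.length = 1) (m : Nat) :
    ((pvCanon cl m).toList.map pvToS) = (pvEncR cl m).reverse := by
  apply pvJoin_split
  intro s hs
  exact h1 s (pvEncR_valid cl m s (List.mem_reverse.mp hs))

theorem pvCanon_val (cl : List String) (hne : cl ≠ []) (hnd : cl.Nodup)
    (h1 : ∀ s ∈ cl, s.toList.length = 1) (m : Nat) :
    pvVal cl (pvCanon cl m) = m := by
  unfold pvVal
  rw [pvCanon_np cl h1 m, List.reverse_reverse]
  exact pvDecR_pvEncR cl hne hnd m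

theorem pvCanon_ne_empty (cl : List String) (h1 : ∀ s ∈ cl, s.toList.length = 1)
    (m : Nat) (hm : 1 ≤ m) (hL : cl.length ≠ 0) : pvCanon cl m ≠ "" := by
  intro hcon
  have h2 : ((pvCanon cl m).toList.map pvToS) = (pvEncR cl m).reverse := pvCanon_np cl h1 m
  rw [hcon] at h2
  match m, hm with
  | w + 1, _ =>
    rw [pvEncR] at h2
    simp only [hL, dite_false] at h2
    simp at h2

-- L7: one outer iteration on a valid nonempty password
theorem pvStepA_eq (cl : List String) (hne : cl ≠ []) (hnd : cl.Nodup)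
    (h1 : ∀ s ∈ cl, s.toList.length = 1) (s : String) (hs : s ≠ "")
    (hv : ∀ c ∈ s.toList, String.ofList [c] ∈ cl) :
    pvStepA cl s = some (pvCanon cl (pvVal cl s + 1)) := by
  unfold pvStepA
  dsimp only
  set np : List String := s.toList.map (fun c => String.ofList [c]) with hnp
  have hvnp : ∀ d ∈ np, d ∈ cl := by
    intro d hd
    rw [hnp] at hd
    rcases List.mem_map.mp hd with ⟨c, hc, rfl⟩
    exact hv c hc
  have hnpne : np ≠ [] := by
    rw [hnp]
    simpa using hs
  obtain ⟨r, hrq⟩ : ∃ r, np = r.reverse := ⟨np.reverse, (List.reverse_reverse np).symm⟩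
  have hrne : r ≠ [] := by
    intro h
    exact hnpne (by rw [hrq, h]; rfl)
  have hrv : ∀ d ∈ r, d ∈ cl := by
    intro d hd
    exact hvnp d (by rw [hrq]; exact List.mem_reverse.mpr hd)
  rw [hrq, pvStepGoA_eq cl hne hnd r hrne hrv]
  have hval : pvDecR cl r = pvVal cl s := by
    unfold pvVal
    rw [show (List.map pvToS s.toList) = np from by rw [hnp]; rfl, hrq, List.reverse_reverse]
  have hstep : pvStepRev cl r = pvEncR cl (pvVal cl s + 1) := by
    have hvstep := pvStepRev_valid cl hne r hrv
    have hh := pvEncR_pvDecR cl hnd (pvStepRev cl r) hvstep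
    rw [pvDecR_pvStepRev cl hne hnd r hrne hrv, hval] at hh
    exact hh.symm
  rw [hstep]
  rfl

-- L9: the outer loop computes canon (val + k) for k ≥ 1
theorem pvOuterA_eq (cl : List String) (hne : cl ≠ []) (hnd : cl.Nodup)
    (h1 : ∀ s ∈ cl, s.toList.length = 1) :
    ∀ (k : Nat) (s : String), s ≠ "" → (∀ c ∈ s.toList, String.ofList [c] ∈ cl) →
      pvOuterA cl (k + 1) s = some (pvCanon cl (pvVal cl s + (k + 1))) := by
  intro k
  induction k with
  | zero =>
    intro s hs hv
    rw [pvOuterA, pvStepA_eq cl hne hnd h1 s hs hv]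
    rfl
  | succ k ih =>
    intro s hs hv
    rw [pvOuterA, pvStepA_eq cl hne hnd h1 s hs hv]
    dsimp only
    have hL : cl.length ≠ 0 := by simpa using hne
    have hne1 : pvCanon cl (pvVal cl s + 1) ≠ "" :=
      pvCanon_ne_empty cl h1 _ (by omega) hL
    have hv1 : ∀ c ∈ (pvCanon cl (pvVal cl s + 1)).toList, String.ofList [c] ∈ cl := by
      intro c hc
      have := pvCanon_np cl h1 (pvVal cl s + 1)
      have hmem : pvToS c ∈ (pvEncR cl (pvVal cl s + 1)).reverse := by
        rw [← this]
        exact List.mem_map_of_mem hc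
      exact pvEncR_valid cl _ _ (List.mem_reverse.mp hmem)
    rw [ih (pvCanon cl (pvVal cl s + 1)) hne1 hv1]
    rw [pvCanon_val cl hne hnd h1 (pvVal cl s + 1)]
    congr 2
    omega

theorem pvDict_skip (t : List String) (s : String) (hnotin : s ∉ t) :
    ∀ (d : PySem.Dict String Int) (st : Int),
      PySem.Dict.get? ((PySem.List.enumerate t st).foldl (fun d p => d.insert p.2 p.1) d) s
        = PySem.Dict.get? d s := by
  induction t with
  | nil => intro d st; simp [PySem.List.enumerate]
  | cons b t' ih =>
    intro d st
    rw [PySem.List.enumerate_cons, List.foldl_cons]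
    rw [ih (fun h => hnotin (by simp [h])) _ _]
    exact PySem.Dict.get?_insert_of_ne _ _ (fun h => hnotin (by simp [h]))

-- L10: the comprehension dict maps each alphabet entry to its first index (alphabet duplicate-free)
theorem pvDictB_go :
    ∀ (cl : List String) (d : PySem.Dict String Int) (s : String) (start : Int),
      s ∈ cl → cl.Nodup →
      PySem.Dict.get? ((PySem.List.enumerate cl start).foldl (fun d p => d.insert p.2 p.1) d) s
        = some (start + (cl.idxOf s : Int)) := by
  intro cl
  induction cl with
  | nil => intro d s start h; simp at h
  | cons a t ih =>
    intro d s start hmem hnd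
    rw [PySem.List.enumerate_cons, List.foldl_cons]
    by_cases has : a = s
    · subst has
      have hnotin : a ∉ t := (List.nodup_cons.mp hnd).1
      rw [pvDict_skip t a hnotin _ _]
      rw [PySem.Dict.get?_insert_self]
      simp [List.idxOf_cons_self]
    · have hm : s ∈ t := by
        rcases List.mem_cons.mp hmem with h | h
        · exact absurd h.symm has
        · exact h
      rw [ih (d.insert a start) s (start + 1) hm (List.nodup_cons.mp hnd).2]
      rw [List.idxOf_cons_ne _ has]
      push_cast
      ring_nf

theorem pvDecR_append_singleton (cl : List String) (d : String) :
    ∀ r, pvDecR cl (r ++ [d]) = pvDecR cl r + (cl.idxOf d + 1) * cl.length ^ r.length := by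
  intro r
  induction r with
  | nil => simp [pvDecR]
  | cons e t ih =>
    simp only [List.cons_append, pvDecR, ih, List.length_cons]
    ring

-- L11: the decoding fold computes pvVal (alphabet duplicate-free, all chars present)
theorem pvDecodeB_go (cl : List String) (hnd : cl.Nodup) :
    ∀ (cs : List Char) (a : Int), (∀ c ∈ cs, String.ofList [c] ∈ cl) →
      cs.foldl (fun acc c => acc.bind (fun v =>
          (PySem.Dict.get? (pvDictB cl) (String.ofList [c])).map
            (fun i => v * (cl.length : Int) + i + 1)))
        (some a)
      = some (a * ((cl.length ^ cs.length : Nat) : Int) + (pvDecR cl ((cs.map pvToS).reverse) : Int)) := by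
  intro cs
  induction cs with
  | nil => intro a _; simp [pvDecR]
  | cons c t ih =>
    intro a hv
    rw [List.foldl_cons]
    have hmem : String.ofList [c] ∈ cl := hv c (by simp)
    have hget : PySem.Dict.get? (pvDictB cl) (String.ofList [c])
        = some ((cl.idxOf (String.ofList [c]) : Int)) := by
      unfold pvDictB
      rw [pvDictB_go cl PySem.Dict.empty _ 0 hmem hnd]
      simp
    simp only [hget, Option.bind_some, Option.map_some]
    rw [ih _ (fun x hx => hv x (by simp [hx]))]
    congr 1
    have hrev : ((c :: t).map pvToS).reverse = (t.map pvToS).reverse ++ [pvToS c] := by simp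
    rw [hrev, pvDecR_append_singleton]
    have hl : ((t.map pvToS).reverse).length = t.length := by simp
    rw [hl]
    have hToS : pvToS c = String.ofList [c] := rfl
    rw [hToS]
    simp only [List.length_cons, pow_succ]
    push_cast
    ring

-- L12: the while loop writes pvEncR, appended to the accumulator
theorem pvEncodeB_go (cl : List String) (hL : cl.length ≠ 0) :
    ∀ (n : Nat) (v : Int), v.toNat = n → ∀ (out : List String),
      pvEncodeB cl (cl.length : Int) v out = out ++ pvEncR cl v.toNat := by
  intro n
  induction n using Nat.strong_induction_on with
  | _ n ih =>
    intro v hvn out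
    have hlen' : (0:Int) < (cl.length : Int) := by exact_mod_cast Nat.pos_of_ne_zero hL
    rw [pvEncodeB]
    by_cases hpos : 0 < v ∧ 0 < (cl.length : Int)
    · rw [dif_pos hpos]
      obtain ⟨hv1, _⟩ := hpos
      have hw : v - 1 = (((v - 1).toNat : Nat) : Int) := by omega
      rw [hw, PySem.Int.floordiv_natCast, PySem.Int.mod_natCast]
      set w := (v - 1).toNat with hwdef
      have hb : w % cl.length < cl.length := Nat.mod_lt _ (Nat.pos_of_ne_zero hL)
      have hget : PySem.List.pyGet? cl ((w % cl.length : Nat) : Int)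
          = some (cl[w % cl.length]'hb) := by
        rw [PySem.List.pyGet?_natCast]
        simp [List.getElem?_eq_getElem hb]
      rw [hget]
      have hlt : w / cl.length < n := by
        have := Nat.div_le_self w cl.length
        omega
      rw [ih (w / cl.length) hlt (((w / cl.length : Nat) : Int)) rfl]
      rw [show v.toNat = w + 1 by omega, pvEncR]
      rw [dif_neg hL]
      simp
      rw [Int.ofNat_ediv_ofNat]
      rfl
    · rw [dif_neg hpos]
      have hv0 : v ≤ 0 := by
        by_contra hcon
        exact hpos ⟨by omega, hlen'⟩
      rw [show v.toNat = 0 by omega]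
      simp [pvEncR]

theorem pvEncodeB_eq (cl : List String) (hL : cl.length ≠ 0) (v : Int) (out : List String) :
    pvEncodeB cl (cl.length : Int) v out = out ++ pvEncR cl v.toNat :=
  pvEncodeB_go cl hL v.toNat v rfl out


-- A's body on the empty password: the inner loop never runs
theorem pvStepA_empty (cl : List String) : pvStepA cl "" = some "" := by
  unfold pvStepA
  dsimp only
  rw [show ("" : String).toList = [] from rfl]
  simp only [List.map_nil, List.length_nil, Nat.cast_zero]
  rw [PySem.List.pyRange_neg_one_eq_nil (by omega)]
  rw [pvStepGoA]
  rfl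

theorem pvOuterA_empty (cl : List String) : ∀ k, pvOuterA cl k "" = some "" := by
  intro k
  induction k with
  | zero => rfl
  | succ k ih =>
    rw [pvOuterA, pvStepA_empty]
    exact ih

-- B's value for a positive increment on a valid password is pvCanon
theorem pvAltCanon (cl : List String) (inc : Int) (s : String)
    (hinc : 0 < inc) (hne : cl ≠ []) (h1 : ∀ x ∈ cl, x.toList.length = 1)
    (hnd : cl.Nodup) (hv : ∀ c ∈ s.toList, String.ofList [c] ∈ cl) :
    getPswds_alt cl inc s = pvCanon cl (pvVal cl s + inc.toNat) := by
  have hL : cl.length ≠ 0 := by simpa using hne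
  unfold getPswds_alt
  rw [if_neg (by omega : ¬ inc ≤ 0)]
  dsimp only
  rw [pvDecodeB_go cl hnd s.toList 0 hv]
  dsimp only
  rw [show (0 : Int) * ((cl.length ^ s.toList.length : Nat) : Int)
        + ((pvDecR cl ((s.toList.map pvToS).reverse) : Nat) : Int)
      = ((pvVal cl s : Nat) : Int) by unfold pvVal; ring]
  rw [pvEncodeB_eq cl hL]
  rw [show (((pvVal cl s : Nat) : Int) + inc).toNat = pvVal cl s + inc.toNat by omega]
  rfl

-- the two programs agree: nonpositive increment
theorem pvAgree_nonpos (cl : List String) (inc : Int) (s : String) (hinc : inc ≤ 0) :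
    getPswds cl inc s = getPswds_alt cl inc s := by
  unfold getPswds getPswds_alt
  rw [if_pos hinc, show inc.toNat = 0 by omega]
  rfl

-- the two programs agree: positive increment, valid alphabet, nonempty password
theorem pvAgree_pos (cl : List String) (inc : Int) (s : String)
    (hinc : 0 < inc) (hne : cl ≠ []) (h1 : ∀ x ∈ cl, x.toList.length = 1)
    (hnd : cl.Nodup) (hv : ∀ c ∈ s.toList, String.ofList [c] ∈ cl) (hs : s ≠ "") :
    getPswds cl inc s = getPswds_alt cl inc s := by
  obtain ⟨k, hk⟩ : ∃ k, inc.toNat = k + 1 := ⟨inc.toNat - 1, by omega⟩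
  unfold getPswds
  rw [hk, pvOuterA_eq cl hne hnd h1 k s hs hv, ← hk]
  rw [pvAltCanon cl inc s hinc hne h1 hnd hv]
  rfl

-- ===== VERDICT (by name: the statement is the Claim_ definition above) =====
theorem getPswds_spec : Claim_unchanged_getPswds := by
  intro cl inc s _ hpre hD
  by_cases hinc : inc ≤ 0
  · exact pvAgree_nonpos cl inc s hinc
  · rcases hpre with h | ⟨hne, h1, hnd, hv⟩
    · exact absurd h hinc
    · have hs : s ≠ "" := by
        intro h
        exact hD ⟨h, by omega⟩
      have h1' : ∀ x ∈ cl, x.toList.length = 1 := by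
        intro x hx
        have := List.all_eq_true.mp h1 x hx
        simpa using this
      have hv' : ∀ c ∈ s.toList, String.ofList [c] ∈ cl := by
        intro c hc
        have hcont := List.all_eq_true.mp hv c hc
        have hmem : ([c] : List Char) ∈ cl.map String.toList := by
          simpa using hcont
        rcases List.mem_map.mp hmem with ⟨x, hx, htx⟩
        have hxe : String.ofList [c] = x := by rw [← htx]; exact String.ofList_toList
        rw [hxe]; exact hx
      exact pvAgree_pos cl inc s (by omega) hne h1' hnd hv' hs

set_option maxRecDepth 8192 in
theorem getPswds_changed : Claim_changed_getPswds := by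
  unfold Claim_changed_getPswds
  have h1 : Dom_getPswds ["a", "b"] 1 "" := by decide
  have h2 : Pre_getPswds ["a", "b"] 1 "" := by decide
  have h3 : D_getPswds ["a", "b"] 1 "" := by decide
  have h4 : getPswds ["a", "b"] 1 "" = "" := by decide
  have h5 : getPswds_alt ["a", "b"] 1 "" = "a" := by
    simp [getPswds_alt, pvDictB, pvEncodeB]
    decide
  exact ⟨h1, h2, h3, h4, h5, by decide⟩

theorem getPswds_tight : Claim_exact_getPswds := by
  intro cl inc s _ hpre hD
  obtain ⟨hs, hinc⟩ := hD
  subst hs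
  rcases hpre with h | ⟨hne, h1, hnd, _⟩
  · omega
  · have h1' : ∀ x ∈ cl, x.toList.length = 1 := by
      intro x hx
      have := List.all_eq_true.mp h1 x hx
      simpa using this
    have hL : cl.length ≠ 0 := by simpa using hne
    have hA : getPswds cl inc "" = "" := by
      unfold getPswds
      rw [pvOuterA_empty]
      rfl
    have hB : getPswds_alt cl inc "" = pvCanon cl (0 + inc.toNat) := by
      have := pvAltCanon cl inc "" (by omega) hne h1' hnd (by intro c hc; simp at hc)
      rwa [show pvVal cl "" = 0 from rfl] at this
    rw [hA, hB]
    intro hcon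
    exact pvCanon_ne_empty cl h1' (0 + inc.toNat) (by omega) hL hcon.symm
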